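-- pv_equiv track=rewrite | github.com/tristenlammi/Promptly | backend/app/models_config/provider.py | _detect_vision_by_id
-- ===== SOURCE A (Python) =====
-- def _detect_vision_by_id(provider_type: str, model_id: str) -> bool:
--     """Cheap per-type heuristic for whether a model can read images.
--
--     Non-openrouter providers don't return structured modality info on
--     their ``/models`` endpoint, so we match known vision families by
--     id. Err on the side of ``False`` for unknown entries — a wrong
--     ``True`` would let the user attach an image the model silently
--     drops, whereas a wrong ``False`` is just a missing "Vision" badge.
--     """
--     mid = model_id.lower()
--     if provider_type == "openai":
--         # gpt-4o*, gpt-4.1*, gpt-4-turbo*, gpt-4-vision*, o1*, o3*, o4*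
--         if mid.startswith(("gpt-4o", "gpt-4.1", "gpt-4-turbo", "gpt-4-vision")):
--             return True
--         if mid.startswith(("o1", "o3", "o4", "chatgpt-4o")):
--             return True
--         return False
--     if provider_type == "anthropic":
--         # Every Claude 3+ model supports image input.
--         return "claude-3" in mid or "claude-4" in mid or "claude-sonnet" in mid or "claude-opus" in mid or "claude-haiku" in mid
--     if provider_type == "gemini":
--         # Every Gemini 1.5+ (and the ``*-pro-vision`` legacy) reads images.
--         return (
--             mid.startswith("gemini-1.5")
--             or mid.startswith("gemini-2")
--             or mid.startswith("gemini-3")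
--             or "vision" in mid
--         )
--     if provider_type == "ollama":
--         # Known vision-capable open model families.
--         keywords = (
--             "llava", "bakllava", "moondream", "qwen2-vl", "qwen-vl",
--             "minicpm-v", "vision", "llama3.2-vision", "llama-3.2-vision",
--         )
--         return any(k in mid for k in keywords)
--     # openrouter / openai_compatible / anything else → let the richer
--     # catalog logic decide (openrouter) or default off.
--     return False
-- ===== SOURCE B (Python) =====
-- # Flat rule-list rewrite: one ordered list of (provider, pattern, anchored) rules
-- # scanned by a single loop; both prefix and substring tests collapse to one
-- # primitive, str.find, with the anchored flag deciding whether position 0 is required.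
-- _VISION_RULES = [
--     ("openai", "gpt-4o", True),
--     ("openai", "gpt-4.1", True),
--     ("openai", "gpt-4-turbo", True),
--     ("openai", "gpt-4-vision", True),
--     ("openai", "o1", True),
--     ("openai", "o3", True),
--     ("openai", "o4", True),
--     ("openai", "chatgpt-4o", True),
--     ("anthropic", "claude-3", False),
--     ("anthropic", "claude-4", False),
--     ("anthropic", "claude-sonnet", False),
--     ("anthropic", "claude-opus", False),
--     ("anthropic", "claude-haiku", False),
--     ("gemini", "gemini-1.5", True),
--     ("gemini", "gemini-2", True),
--     ("gemini", "gemini-3", True),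
--     ("gemini", "vision", False),
--     ("ollama", "llava", False),
--     ("ollama", "bakllava", False),
--     ("ollama", "moondream", False),
--     ("ollama", "qwen2-vl", False),
--     ("ollama", "qwen-vl", False),
--     ("ollama", "minicpm-v", False),
--     ("ollama", "vision", False),
--     ("ollama", "llama3.2-vision", False),
--     ("ollama", "llama-3.2-vision", False),
-- ]
--
--
-- def _detect_vision_by_id(provider_type: str, model_id: str) -> bool:
--     mid = model_id.lower()
--     for prov, pat, anchored in _VISION_RULES:
--         if prov != provider_type:
--             continue
--         pos = mid.find(pat)
--         if pos == 0 or (pos > 0 and not anchored):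
--             return True
--     return False
-- ===== Notes on version B (the rewrite author's own statement) =====
-- stated objective: alternative
-- what changed: Replaces A's four per-provider branch blocks and two matching primitives (startswith / in) with one flat ordered rule list (provider, pattern, anchored) scanned by a single early-return loop whose only primitive is str.find, the anchored flag deciding whether position 0 is required.
import Mathlib
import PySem

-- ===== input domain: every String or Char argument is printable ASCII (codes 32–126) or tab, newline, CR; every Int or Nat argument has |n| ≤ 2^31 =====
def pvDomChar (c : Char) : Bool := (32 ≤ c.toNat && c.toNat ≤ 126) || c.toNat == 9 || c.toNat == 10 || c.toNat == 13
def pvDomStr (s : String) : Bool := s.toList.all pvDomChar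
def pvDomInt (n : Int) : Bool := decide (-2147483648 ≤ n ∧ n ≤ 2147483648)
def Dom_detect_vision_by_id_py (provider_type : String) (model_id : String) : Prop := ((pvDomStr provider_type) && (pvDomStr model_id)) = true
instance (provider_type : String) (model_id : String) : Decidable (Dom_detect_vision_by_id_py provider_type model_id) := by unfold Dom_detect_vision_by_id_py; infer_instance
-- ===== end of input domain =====

-- B replaces A's four per-provider branch blocks with one flat ordered rule list (provider, pattern, anchored) scanned by a single loop whose sole matching primitive is str.find (alternative decomposition; same cost).


-- ===== PORT A =====
def detect_vision_by_id_py (provider_type : String) (model_id : String) : Bool :=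
  let mid := PySem.Str.lower model_id
  if provider_type == "openai" then
    if PySem.Str.startswith mid "gpt-4o" || PySem.Str.startswith mid "gpt-4.1" ||
       PySem.Str.startswith mid "gpt-4-turbo" || PySem.Str.startswith mid "gpt-4-vision" then
      true
    else if PySem.Str.startswith mid "o1" || PySem.Str.startswith mid "o3" ||
            PySem.Str.startswith mid "o4" || PySem.Str.startswith mid "chatgpt-4o" then
      true
    else
      false
  else if provider_type == "anthropic" then
    PySem.Str.isIn "claude-3" mid || PySem.Str.isIn "claude-4" mid ||
    PySem.Str.isIn "claude-sonnet" mid || PySem.Str.isIn "claude-opus" mid ||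
    PySem.Str.isIn "claude-haiku" mid
  else if provider_type == "gemini" then
    PySem.Str.startswith mid "gemini-1.5" || PySem.Str.startswith mid "gemini-2" ||
    PySem.Str.startswith mid "gemini-3" || PySem.Str.isIn "vision" mid
  else if provider_type == "ollama" then
    ["llava", "bakllava", "moondream", "qwen2-vl", "qwen-vl",
     "minicpm-v", "vision", "llama3.2-vision", "llama-3.2-vision"].any
      (fun k => PySem.Str.isIn k mid)
  else
    false

-- ===== PORT B =====
-- Source B's flat ordered rule list: (provider, pattern, anchored)
def pvVisionRules : List (String × String × Bool) :=
  [("openai", "gpt-4o", true), ("openai", "gpt-4.1", true),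
   ("openai", "gpt-4-turbo", true), ("openai", "gpt-4-vision", true),
   ("openai", "o1", true), ("openai", "o3", true), ("openai", "o4", true),
   ("openai", "chatgpt-4o", true),
   ("anthropic", "claude-3", false), ("anthropic", "claude-4", false),
   ("anthropic", "claude-sonnet", false), ("anthropic", "claude-opus", false),
   ("anthropic", "claude-haiku", false),
   ("gemini", "gemini-1.5", true), ("gemini", "gemini-2", true),
   ("gemini", "gemini-3", true), ("gemini", "vision", false),
   ("ollama", "llava", false), ("ollama", "bakllava", false),
   ("ollama", "moondream", false), ("ollama", "qwen2-vl", false),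
   ("ollama", "qwen-vl", false), ("ollama", "minicpm-v", false),
   ("ollama", "vision", false), ("ollama", "llama3.2-vision", false),
   ("ollama", "llama-3.2-vision", false)]

-- Source B's loop with early return = List.any over the rules; `pos == 0 or (pos > 0 and not anchored)` on mid.find(pat)
def detect_vision_by_id_py_alt (provider_type : String) (model_id : String) : Bool :=
  let mid := PySem.Str.lower model_id
  pvVisionRules.any (fun r =>
    r.1 == provider_type &&
      (let pos := PySem.Str.find mid r.2.1
       pos == 0 || (decide (0 < pos) && !r.2.2)))

-- ===== PRECONDITION & SPEC =====
def Spec_detect_vision_by_id_py (provider_type : String) (model_id : String) (out : Bool) : Prop := out = detect_vision_by_id_py_alt provider_type model_id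
instance (provider_type : String) (model_id : String) (out : Bool) : Decidable (Spec_detect_vision_by_id_py provider_type model_id out) := by unfold Spec_detect_vision_by_id_py; infer_instance

-- ===== CLAIM (what is proved, stated in full; the proofs are below) =====
def Claim_equal_detect_vision_by_id_py : Prop := ∀ (provider_type : String) (model_id : String), Dom_detect_vision_by_id_py provider_type model_id → Spec_detect_vision_by_id_py provider_type model_id (detect_vision_by_id_py provider_type model_id)

-- ===== LEMMAS AND PROOFS =====

-- `find s sub = 0` characterises a prefix occurrence
theorem pv_chars_find_eq_zero_iff (s sub : List Char) :
    PySem.Chars.find s sub = 0 ↔ sub <+: s := by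
  constructor
  · intro h
    have h0 : 0 ≤ PySem.Chars.find s sub := by omega
    have hs := PySem.Chars.find_spec (s := s) (sub := sub) h0
    simpa [h] using hs.1
  · intro h
    have h0 : 0 ≤ PySem.Chars.find s sub :=
      (PySem.Chars.find_nonneg_iff s sub).mpr h.isInfix
    have hs := PySem.Chars.find_spec (s := s) (sub := sub) h0
    by_contra hne
    have hpos : 0 < (PySem.Chars.find s sub).toNat := by omega
    exact hs.2 0 hpos (by simpa using h)

-- unanchored rule, Prop level: `prefix-or-later-occurrence` is exactly `substring`
theorem pv_prefix_or_find_pos (s sub : List Char) :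
    (sub <+: s ∨ 0 < PySem.Chars.find s sub) ↔ sub <:+: s := by
  constructor
  · rintro (h | h)
    · exact h.isInfix
    · exact (PySem.Chars.find_nonneg_iff s sub).mp (le_of_lt h)
  · intro h
    have h0 := (PySem.Chars.find_nonneg_iff s sub).mpr h
    rcases eq_or_lt_of_le h0 with h' | h'
    · exact Or.inl ((pv_chars_find_eq_zero_iff s sub).mp h'.symm)
    · exact Or.inr h'

-- the same with a trailing disjunct, for right-associated goals
theorem pv_prefix_or_find_pos' (s sub : List Char) (r : Prop) :
    (sub <+: s ∨ (0 < PySem.Chars.find s sub ∨ r)) ↔ (sub <:+: s ∨ r)  := by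
  rw [← or_assoc, pv_prefix_or_find_pos]

-- ===== VERDICT (by name: the statement is the Claim_ definition above) =====
theorem detect_vision_by_id_py_spec : Claim_equal_detect_vision_by_id_py := by
  intro pt m _
  unfold Spec_detect_vision_by_id_py detect_vision_by_id_py detect_vision_by_id_py_alt
  by_cases h1 : pt = "openai"
  · simp [h1, pvVisionRules, Bool.or_assoc]
    rw [Bool.eq_iff_iff]
    simp only [Bool.or_eq_true, beq_iff_eq, PySem.Chars.startswith_iff,
      pv_chars_find_eq_zero_iff]
  · by_cases h2 : pt = "anthropic"
    · simp [h2, pvVisionRules, Bool.or_assoc]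
      rw [Bool.eq_iff_iff]
      simp only [Bool.or_eq_true, decide_eq_true_eq, beq_iff_eq, PySem.Chars.isIn_iff_infix,
        pv_chars_find_eq_zero_iff, pv_prefix_or_find_pos', pv_prefix_or_find_pos]
    · by_cases h3 : pt = "gemini"
      · simp [h3, pvVisionRules, Bool.or_assoc]
        rw [Bool.eq_iff_iff]
        simp only [Bool.or_eq_true, decide_eq_true_eq, beq_iff_eq,
          PySem.Chars.startswith_iff, PySem.Chars.isIn_iff_infix,
          pv_chars_find_eq_zero_iff, pv_prefix_or_find_pos]
      · by_cases h4 : pt = "ollama"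
        · simp [h4, pvVisionRules, Bool.or_assoc]
          rw [Bool.eq_iff_iff]
          simp only [Bool.or_eq_true, decide_eq_true_eq, beq_iff_eq, PySem.Chars.isIn_iff_infix,
            pv_chars_find_eq_zero_iff, pv_prefix_or_find_pos', pv_prefix_or_find_pos]
        · have e1 : ("openai" == pt) = false := by simp [Ne.symm h1]
          have e2 : ("anthropic" == pt) = false := by simp [Ne.symm h2]
          have e3 : ("gemini" == pt) = false := by simp [Ne.symm h3]
          have e4 : ("ollama" == pt) = false := by simp [Ne.symm h4]
          simp [pvVisionRules, h1, h2, h3, h4, e1, e2, e3, e4]
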